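-- pv_equiv track=rewrite | github.com/ceph/ceph-build | auto-ptl-batch/scripts/group_prs.py | greedy_color
-- ===== SOURCE A (Python) =====
-- def greedy_color(pr_nums, conflict_edges, max_batch):
--     """
--     Greedy graph colouring: assign PRs to sub-batches so that no two
--     conflicting PRs share a batch, and each batch contains ≤ max_batch PRs.
--
--     Returns a list of lists (sub-batches), preserving original PR order
--     within each batch.
--     """
--     batches = []
--     for pr in pr_nums:
--         placed = False
--         for batch in batches:
--             if len(batch) >= max_batch:
--                 continue
--             if any(other in conflict_edges.get(pr, set()) for other in batch):
--                 continue
--             batch.append(pr)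
--             placed = True
--             break
--         if not placed:
--             batches.append([pr])
--     return batches
-- ===== SOURCE B (Python) =====
-- def greedy_color(pr_nums, conflict_edges, max_batch):
--     """
--     Same greedy batching, but instead of scanning each candidate batch's
--     members for a conflict, it maintains an index 'located'
--     (value -> batch indices containing it) plus a size table, and derives
--     the set of forbidden batches directly from pr's adjacency list.
--     """
--     batches = []
--     sizes = []      # sizes[i] == len(batches[i])
--     located = {}    # value -> list of indices of batches containing it
--     for pr in pr_nums:
--         forbidden = set()
--         for other in conflict_edges.get(pr, ()):
--             forbidden.update(located.get(other, ()))
--         idx = next((i for i in range(len(batches))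
--                     if sizes[i] < max_batch and i not in forbidden), None)
--         if idx is None:
--             idx = len(batches)
--             batches.append([pr])
--             sizes.append(1)
--         else:
--             batches[idx].append(pr)
--             sizes[idx] += 1
--         located.setdefault(pr, []).append(idx)
--     return batches
-- ===== Notes on version B (the rewrite author's own statement) =====
-- stated objective: faster
-- what changed: Replaces A's per-batch member scan (membership of every batch element in pr's conflict set) by an inverted index value->batch-indices plus a size table, so forbidden batches are computed from pr's adjacency list and each batch is tested by an O(1) size/forbidden check.
import Mathlib
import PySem

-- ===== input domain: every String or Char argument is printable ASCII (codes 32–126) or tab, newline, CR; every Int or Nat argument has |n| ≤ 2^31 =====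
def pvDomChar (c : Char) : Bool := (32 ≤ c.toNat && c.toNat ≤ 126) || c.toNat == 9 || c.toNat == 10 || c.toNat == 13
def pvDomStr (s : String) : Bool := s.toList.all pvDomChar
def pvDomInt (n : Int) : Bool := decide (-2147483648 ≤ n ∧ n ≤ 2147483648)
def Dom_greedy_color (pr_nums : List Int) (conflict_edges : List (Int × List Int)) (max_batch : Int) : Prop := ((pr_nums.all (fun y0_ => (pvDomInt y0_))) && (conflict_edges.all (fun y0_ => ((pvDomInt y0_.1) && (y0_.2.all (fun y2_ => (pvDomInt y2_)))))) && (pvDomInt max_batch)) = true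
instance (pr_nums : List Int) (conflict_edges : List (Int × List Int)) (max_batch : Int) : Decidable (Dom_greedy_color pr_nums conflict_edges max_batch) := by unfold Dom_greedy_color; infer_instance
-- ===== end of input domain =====

-- B replaces A's per-batch member scans by an inverted index (value -> batch indices)
-- plus a size table; objective: faster (asymptotic). Equivalence is about the return value.

-- ===== PORT A =====
-- inner 'for batch in batches: …' loop of A: returns some of the updated batches list
-- when pr was placed into the first admissible batch, none when the loop falls through.
def gcPlaceA (conf : List Int) (max_batch : Int) (pr : Int) : List (List Int) → Option (List (List Int))
  | [] => none
  | batch :: rest =>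
    if max_batch ≤ (batch.length : Int) then
      (gcPlaceA conf max_batch pr rest).map (fun bs => batch :: bs)
    else if batch.any (fun other => conf.contains other) then
      (gcPlaceA conf max_batch pr rest).map (fun bs => batch :: bs)
    else
      some ((batch ++ [pr]) :: rest)

def greedy_color (pr_nums : List Int) (conflict_edges : List (Int × List Int)) (max_batch : Int) : List (List Int) :=
  pr_nums.foldl (fun batches pr =>
    let conf := (conflict_edges.lookup pr).getD []    -- conflict_edges.get(pr, set())
    match gcPlaceA conf max_batch pr batches with
    | some bs => bs                                   -- placed = True, break
    | none => batches ++ [[pr]]) []                   -- if not placed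

-- ===== PORT B =====
-- forbidden = union of located[other] over pr's adjacency list
def gcForbidden (located : PySem.Dict Int (List Nat)) (conf : List Int) : PySem.Set Nat :=
  conf.foldl (fun acc other => PySem.Set.update acc ((located.get? other).getD [])) PySem.Set.empty

-- next(i for i in range(len(batches)) if sizes[i] < max_batch and i not in forbidden)
def gcFind (max_batch : Int) (forbidden : PySem.Set Nat) (i : Nat) : List Int → Option Nat
  | [] => none
  | s :: srest =>
    if s < max_batch && !(forbidden.contains i) then some i
    else gcFind max_batch forbidden (i + 1) srest

def gcStepB (conflict_edges : List (Int × List Int)) (max_batch : Int)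
    (st : List (List Int) × List Int × PySem.Dict Int (List Nat)) (pr : Int) :
    List (List Int) × List Int × PySem.Dict Int (List Nat) :=
  let batches := st.1
  let sizes := st.2.1
  let located := st.2.2
  let conf := (conflict_edges.lookup pr).getD []
  let forbidden := gcForbidden located conf
  match gcFind max_batch forbidden 0 sizes with
  | some i =>
      (batches.modify i (fun b => b ++ [pr]), sizes.modify i (fun s => s + 1),
       located.insert pr (((located.get? pr).getD []) ++ [i]))
  | none =>
      (batches ++ [[pr]], sizes ++ [1],
       located.insert pr (((located.get? pr).getD []) ++ [batches.length]))

def greedy_color_alt (pr_nums : List Int) (conflict_edges : List (Int × List Int)) (max_batch : Int) : List (List Int) :=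
  (pr_nums.foldl (gcStepB conflict_edges max_batch) ([], [], PySem.Dict.empty)).1

-- ===== PRECONDITION & SPEC =====
def Spec_greedy_color (pr_nums : List Int) (conflict_edges : List (Int × List Int)) (max_batch : Int) (out : List (List Int)) : Prop := out = greedy_color_alt pr_nums conflict_edges max_batch
instance (pr_nums : List Int) (conflict_edges : List (Int × List Int)) (max_batch : Int) (out : List (List Int)) : Decidable (Spec_greedy_color pr_nums conflict_edges max_batch out) := by unfold Spec_greedy_color; infer_instance

-- ===== CLAIM (what is proved, stated in full; the proofs are below) =====
def Claim_equal_greedy_color : Prop := ∀ (pr_nums : List Int) (conflict_edges : List (Int × List Int)) (max_batch : Int), Dom_greedy_color pr_nums conflict_edges max_batch → Spec_greedy_color pr_nums conflict_edges max_batch (greedy_color pr_nums conflict_edges max_batch)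

-- ===== LEMMAS AND PROOFS =====

-- state invariant tying B's auxiliary tables to the batches list
def gcInv (batches : List (List Int)) (sizes : List Int) (located : PySem.Dict Int (List Nat)) : Prop :=
  sizes = batches.map (fun b => (b.length : Int)) ∧
  ∀ (v : Int) (i : Nat), i ∈ ((located.get? v).getD []) ↔ ∃ h : i < batches.length, v ∈ batches[i]

theorem gcFind_ge (max_batch : Int) (forbidden : PySem.Set Nat) :
    ∀ (sizes : List Int) (i0 j : Nat), gcFind max_batch forbidden i0 sizes = some j → i0 ≤ j ∧ j < i0 + sizes.length := by
  intro sizes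
  induction sizes with
  | nil => intro i0 j h; simp [gcFind] at h
  | cons s rest ih =>
    intro i0 j h
    simp only [gcFind] at h
    split at h
    · cases h; simp only [List.length_cons]; omega
    · have := ih (i0 + 1) j h; simp only [List.length_cons]; omega

theorem gcForbidden_aux (located : PySem.Dict Int (List Nat)) (i : Nat) :
    ∀ (conf : List Int) (acc : PySem.Set Nat),
      i ∈ conf.foldl (fun acc other => PySem.Set.update acc ((located.get? other).getD [])) acc ↔
      i ∈ acc ∨ ∃ o ∈ conf, i ∈ ((located.get? o).getD []) := by
  intro conf
  induction conf with
  | nil => simp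
  | cons o rest ih =>
    intro acc
    simp only [List.foldl_cons, ih, PySem.Set.mem_update, List.mem_cons]
    constructor
    · rintro (⟨h | h⟩ | ⟨x, hx, hm⟩)
      · exact Or.inl h
      · exact Or.inr ⟨o, Or.inl rfl, h⟩
      · exact Or.inr ⟨x, Or.inr hx, hm⟩
    · rintro (h | ⟨x, (rfl | hx), hm⟩)
      · exact Or.inl (Or.inl h)
      · exact Or.inl (Or.inr hm)
      · exact Or.inr ⟨x, hx, hm⟩

theorem gcForbidden_mem (located : PySem.Dict Int (List Nat)) (conf : List Int) (i : Nat) :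
    i ∈ gcForbidden located conf ↔ ∃ o ∈ conf, i ∈ ((located.get? o).getD []) := by
  unfold gcForbidden
  rw [gcForbidden_aux]
  simp [PySem.Set.empty]

-- the inner search of A and of B find the same place
theorem gcPlace_eq (conf : List Int) (max_batch : Int) (pr : Int) (forbidden : PySem.Set Nat) :
    ∀ (batches : List (List Int)) (i0 : Nat),
      (∀ k (hk : k < batches.length), (i0 + k) ∈ forbidden ↔ ∃ o ∈ batches[k], conf.contains o = true) →
      gcPlaceA conf max_batch pr batches =
        (gcFind max_batch forbidden i0 (batches.map (fun b => (b.length : Int)))).map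
          (fun i => batches.modify (i - i0) (fun b => b ++ [pr])) := by
  intro batches
  induction batches with
  | nil => intro i0 _; rfl
  | cons batch rest ih =>
    intro i0 H
    have H0 : i0 ∈ forbidden ↔ ∃ o ∈ batch, conf.contains o = true := by
      have := H 0 (by simp)
      simpa using this
    have Hshift : ∀ k (hk : k < rest.length),
        ((i0 + 1) + k) ∈ forbidden ↔ ∃ o ∈ rest[k], conf.contains o = true := by
      intro k hk
      have := H (k + 1) (by simp; omega)
      simpa [Nat.add_assoc, Nat.add_comm 1 k] using this
    have IH := ih (i0 + 1) Hshift
    simp only [gcPlaceA, List.map_cons, gcFind]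
    by_cases hfull : max_batch ≤ (batch.length : Int)
    · have hc : (decide ((batch.length : Int) < max_batch) && !forbidden.contains i0) = false := by
        simp [not_lt.mpr hfull]
      rw [if_pos hfull, hc, if_neg (by simp), IH]
      cases hfind : gcFind max_batch forbidden (i0 + 1) (rest.map (fun b => ((b.length : Int)))) with
      | none => rfl
      | some j =>
        have hj := gcFind_ge max_batch forbidden _ _ _ hfind
        simp only [Option.map_some]
        congr 1
        have : j - i0 = (j - (i0 + 1)) + 1 := by omega
        rw [this, List.modify_cons]
        simp
    · by_cases hin : i0 ∈ forbidden
      · have hany : batch.any (fun other => conf.contains other) = true :=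
          List.any_eq_true.mpr (H0.mp hin)
        have hc : (decide ((batch.length : Int) < max_batch) && !forbidden.contains i0) = false := by
          simp only [Bool.and_eq_false_iff, Bool.not_eq_false']
          exact Or.inr ((PySem.Set.contains_iff forbidden i0).mpr hin)
        rw [if_neg hfull, hany, if_pos rfl, hc, if_neg (by simp), IH]
        cases hfind : gcFind max_batch forbidden (i0 + 1) (rest.map (fun b => ((b.length : Int)))) with
        | none => rfl
        | some j =>
          have hj := gcFind_ge max_batch forbidden _ _ _ hfind
          simp only [Option.map_some]
          congr 1
          have : j - i0 = (j - (i0 + 1)) + 1 := by omega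
          rw [this, List.modify_cons]
          simp
      · have hany : batch.any (fun other => conf.contains other) = false := by
          rw [Bool.eq_false_iff]
          intro hc
          exact hin (H0.mpr (List.any_eq_true.mp hc))
        have hcontains : forbidden.contains i0 = false := by
          rw [Bool.eq_false_iff]
          intro hc
          exact hin ((PySem.Set.contains_iff forbidden i0).mp hc)
        have hc : (decide ((batch.length : Int) < max_batch) && !forbidden.contains i0) = true := by
          simp only [Bool.and_eq_true, decide_eq_true_eq, Bool.not_eq_true', hcontains]
          exact ⟨lt_of_not_ge hfull, trivial⟩
        rw [if_neg hfull, hany, if_neg (by simp), hc, if_pos rfl]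
        simp [List.modify_cons]

theorem gc_map_len_modify (l : List (List Int)) (i : Nat) (pr : Int) :
    (l.modify i (fun b => b ++ [pr])).map (fun b => ((b.length : Int))) =
      (l.map (fun b => ((b.length : Int)))).modify i (fun s => s + 1) := by
  induction l generalizing i with
  | nil => simp
  | cons b rest ih => cases i <;> simp [List.modify_cons, ih]

theorem gc_located_insert (batches : List (List Int)) (located : PySem.Dict Int (List Nat))
    (pr : Int) (i : Nat) (hi : i < batches.length)
    (hl : ∀ (v : Int) (j : Nat), j ∈ ((located.get? v).getD []) ↔ ∃ h : j < batches.length, v ∈ batches[j]) :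
    ∀ (v : Int) (j : Nat),
      j ∈ (((located.insert pr (((located.get? pr).getD []) ++ [i])).get? v).getD []) ↔
      ∃ h : j < (batches.modify i (fun b => b ++ [pr])).length,
        v ∈ (batches.modify i (fun b => b ++ [pr]))[j] := by
  intro v j
  have hmem : ∀ (h : j < batches.length),
      (v ∈ (batches.modify i (fun b => b ++ [pr]))[j]'(by simpa using h) ↔
        v ∈ batches[j] ∨ (j = i ∧ v = pr)) := by
    intro h
    rw [List.getElem_modify]
    by_cases hij : i = j
    · subst hij; simp
    · simp only [if_neg hij]
      constructor
      · exact Or.inl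
      · rintro (hm | ⟨rfl, _⟩)
        · exact hm
        · exact absurd rfl hij
  by_cases hv : v = pr
  · subst hv
    rw [PySem.Dict.get?_insert_self]
    simp only [Option.getD_some, List.mem_append, List.mem_singleton, hl, List.length_modify]
    constructor
    · rintro (⟨h, hm⟩ | rfl)
      · exact ⟨h, (hmem h).mpr (Or.inl hm)⟩
      · exact ⟨hi, (hmem hi).mpr (Or.inr ⟨rfl, rfl⟩)⟩
    · rintro ⟨h, hm⟩
      rcases (hmem h).mp hm with hm' | ⟨rfl, _⟩
      · exact Or.inl ⟨h, hm'⟩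
      · exact Or.inr rfl
  · rw [PySem.Dict.get?_insert_of_ne _ _ hv]
    rw [hl]
    simp only [List.length_modify]
    constructor
    · rintro ⟨h, hm⟩
      exact ⟨h, (hmem h).mpr (Or.inl hm)⟩
    · rintro ⟨h, hm⟩
      rcases (hmem h).mp hm with hm' | ⟨_, hvpr⟩
      · exact ⟨h, hm'⟩
      · exact absurd hvpr hv

theorem gc_located_append (batches : List (List Int)) (located : PySem.Dict Int (List Nat))
    (pr : Int)
    (hl : ∀ (v : Int) (j : Nat), j ∈ ((located.get? v).getD []) ↔ ∃ h : j < batches.length, v ∈ batches[j]) :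
    ∀ (v : Int) (j : Nat),
      j ∈ (((located.insert pr (((located.get? pr).getD []) ++ [batches.length])).get? v).getD []) ↔
      ∃ h : j < (batches ++ [[pr]]).length, v ∈ (batches ++ [[pr]])[j] := by
  intro v j
  have hmem : ∀ (h : j < batches.length + 1),
      (v ∈ (batches ++ [[pr]])[j]'(by simpa using h) ↔
        (∃ h' : j < batches.length, v ∈ batches[j]) ∨ (j = batches.length ∧ v = pr)) := by
    intro h
    rw [List.getElem_append]
    by_cases hj : j < batches.length
    · simp only [dif_pos hj]
      constructor
      · exact fun hm => Or.inl ⟨hj, hm⟩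
      · rintro (⟨_, hm⟩ | ⟨rfl, _⟩)
        · exact hm
        · omega
    · have hje : j = batches.length := by omega
      simp [hje]
  by_cases hv : v = pr
  · subst hv
    rw [PySem.Dict.get?_insert_self]
    simp only [Option.getD_some, List.mem_append, List.mem_singleton, hl, List.length_append,
      List.length_cons, List.length_nil]
    constructor
    · rintro (⟨h, hm⟩ | rfl)
      · exact ⟨by omega, (hmem (by omega)).mpr (Or.inl ⟨h, hm⟩)⟩
      · exact ⟨by omega, (hmem (by omega)).mpr (Or.inr ⟨rfl, rfl⟩)⟩
    · rintro ⟨h, hm⟩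
      rcases (hmem (by omega)).mp hm with ⟨h', hm'⟩ | ⟨rfl, _⟩
      · exact Or.inl ⟨h', hm'⟩
      · exact Or.inr rfl
  · rw [PySem.Dict.get?_insert_of_ne _ _ hv]
    rw [hl]
    simp only [List.length_append, List.length_cons, List.length_nil]
    constructor
    · rintro ⟨h, hm⟩
      exact ⟨by omega, (hmem (by omega)).mpr (Or.inl ⟨h, hm⟩)⟩
    · rintro ⟨h, hm⟩
      rcases (hmem (by omega)).mp hm with ⟨h', hm'⟩ | ⟨_, hvpr⟩
      · exact ⟨h', hm'⟩
      · exact absurd hvpr hv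

theorem gcStep_eq (conflict_edges : List (Int × List Int)) (max_batch : Int)
    (batches : List (List Int)) (sizes : List Int) (located : PySem.Dict Int (List Nat)) (pr : Int)
    (hinv : gcInv batches sizes located) :
    (gcStepB conflict_edges max_batch (batches, sizes, located) pr).1 =
      (match gcPlaceA ((conflict_edges.lookup pr).getD []) max_batch pr batches with
       | some bs => bs
       | none => batches ++ [[pr]]) ∧
    gcInv (gcStepB conflict_edges max_batch (batches, sizes, located) pr).1
          (gcStepB conflict_edges max_batch (batches, sizes, located) pr).2.1
          (gcStepB conflict_edges max_batch (batches, sizes, located) pr).2.2 := by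
  obtain ⟨hs, hl⟩ := hinv
  subst hs
  set conf := (conflict_edges.lookup pr).getD [] with hconf
  set forbidden := gcForbidden located conf with hforb
  have Hforb : ∀ k (hk : k < batches.length),
      (0 + k) ∈ forbidden ↔ ∃ o ∈ batches[k], conf.contains o = true := by
    intro k hk
    rw [hforb, gcForbidden_mem]
    simp only [Nat.zero_add]
    constructor
    · rintro ⟨o, ho, hm⟩
      obtain ⟨_, hmem⟩ := (hl o k).mp hm
      exact ⟨o, hmem, by simpa using ho⟩
    · rintro ⟨o, hmem, hc⟩
      exact ⟨o, by simpa using hc, (hl o k).mpr ⟨hk, hmem⟩⟩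
  have hplace := gcPlace_eq conf max_batch pr forbidden batches 0 Hforb
  simp only [gcStepB]
  cases hfind : gcFind max_batch forbidden 0 (batches.map (fun b => ((b.length : Int)))) with
  | some i =>
      have hi : i < batches.length := by
        have := gcFind_ge max_batch forbidden _ _ _ hfind
        simpa using this.2
      rw [hfind, Option.map_some, Nat.sub_zero] at hplace
      refine ⟨by rw [hplace], ?_, ?_⟩
      · exact (gc_map_len_modify batches i pr).symm
      · exact gc_located_insert batches located pr i hi hl
  | none =>
      rw [hfind, Option.map_none] at hplace
      refine ⟨by rw [hplace], by simp, ?_⟩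
      exact gc_located_append batches located pr hl

theorem gcFold_eq (conflict_edges : List (Int × List Int)) (max_batch : Int) :
    ∀ (prs : List Int) (batches : List (List Int)) (sizes : List Int) (located : PySem.Dict Int (List Nat)),
      gcInv batches sizes located →
      prs.foldl (fun bs pr =>
          match gcPlaceA ((conflict_edges.lookup pr).getD []) max_batch pr bs with
          | some bs' => bs'
          | none => bs ++ [[pr]]) batches =
        (prs.foldl (gcStepB conflict_edges max_batch) (batches, sizes, located)).1 := by
  intro prs
  induction prs with
  | nil => intro batches sizes located _; rfl
  | cons pr rest ih =>
    intro batches sizes located hinv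
    obtain ⟨h1, h2⟩ := gcStep_eq conflict_edges max_batch batches sizes located pr hinv
    simp only [List.foldl_cons]
    rw [← h1]
    exact ih _ _ _ h2

-- ===== VERDICT (by name: the statement is the Claim_ definition above) =====
theorem greedy_color_spec : Claim_equal_greedy_color := by
  intro pr_nums conflict_edges max_batch _
  unfold Spec_greedy_color greedy_color greedy_color_alt
  exact gcFold_eq conflict_edges max_batch pr_nums [] [] PySem.Dict.empty
    ⟨rfl, by intro v i; simp [PySem.Dict.empty, PySem.Dict.get?]⟩
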